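-- pv_equiv track=rewrite | github.com/v0jt4s13/python-test | telewizja.py | strategia_d
-- ===== SOURCE A (Python) =====
-- def strategia_d(movie_list: list) -> dict:
--     earliest_end = movie_list[0]
--
--     for movie in movie_list:
--         if earliest_end['end'] > movie['end']:
--             earliest_end = movie
--         elif (earliest_end['end'] == movie['end']
--             and earliest_end['start'] < movie['start']):
--             earliest_end = movie
--     return earliest_end
-- ===== SOURCE B (Python) =====
-- def strategia_d(movie_list: list) -> dict:
--     return sorted(movie_list, key=lambda m: (m['end'], -m['start']))[0]
-- ===== Notes on version B (the rewrite author's own statement) =====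
-- stated objective: idiomatic
-- what changed: Replaces the hand-written running-minimum scan (with its two-branch tie comparison) by a stable sort on the key (end, -start) followed by taking the first element; stability reproduces A's first-wins tie behaviour.
import Mathlib
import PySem

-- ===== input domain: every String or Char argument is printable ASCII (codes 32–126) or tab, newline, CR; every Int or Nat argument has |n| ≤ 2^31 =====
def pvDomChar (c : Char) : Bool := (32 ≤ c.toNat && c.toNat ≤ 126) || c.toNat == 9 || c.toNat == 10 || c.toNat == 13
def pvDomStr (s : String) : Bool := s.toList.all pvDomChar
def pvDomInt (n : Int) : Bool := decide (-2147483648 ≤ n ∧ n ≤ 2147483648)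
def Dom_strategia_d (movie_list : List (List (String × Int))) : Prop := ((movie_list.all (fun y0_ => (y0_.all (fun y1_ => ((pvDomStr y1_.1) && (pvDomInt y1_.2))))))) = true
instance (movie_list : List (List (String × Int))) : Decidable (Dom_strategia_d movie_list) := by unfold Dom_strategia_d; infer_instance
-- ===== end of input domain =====

-- B replaces A's hand-written running-minimum scan by a stable sort on (end, -start) followed by taking the first element.


-- m['end'] / m['start'] (KeyError = none; Pre_ guarantees the keys are present)
def pvEnd (m : List (String × Int)) : Int := (PySem.Dict.get? (PySem.Dict.mk m) "end").getD 0
def pvStart (m : List (String × Int)) : Int := (PySem.Dict.get? (PySem.Dict.mk m) "start").getD 0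

-- ===== PORT A =====
def strategia_d (movie_list : List (List (String × Int))) : List (String × Int) :=
  let earliest0 := (PySem.List.pyGet? movie_list 0).getD []   -- movie_list[0]; IndexError (none) excluded by Pre_
  movie_list.foldl
    (fun earliest_end movie =>
      if pvEnd earliest_end > pvEnd movie then movie
      else if pvEnd earliest_end = pvEnd movie ∧ pvStart earliest_end < pvStart movie then movie
      else earliest_end)
    earliest0

-- ===== PORT B =====
def strategia_d_alt (movie_list : List (List (String × Int))) : List (String × Int) :=
  (PySem.List.pyGet?
    (PySem.List.sorted2 movie_list (fun m => pvEnd m) (fun m => -(pvStart m)) false)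
    0).getD []   -- [0]; IndexError (none) excluded by Pre_

-- ===== PRECONDITION & SPEC =====
-- Pre_ excludes the empty list (A raises IndexError) and lists with a movie lacking the 'end' or 'start' key:
-- there A's short-circuiting comparisons may still return a value while B's key function raises KeyError.
def Pre_strategia_d (movie_list : List (List (String × Int))) : Prop :=
  movie_list ≠ [] ∧ ∀ m ∈ movie_list, (PySem.Dict.get? (PySem.Dict.mk m) "end").isSome ∧ (PySem.Dict.get? (PySem.Dict.mk m) "start").isSome
instance (movie_list : List (List (String × Int))) : Decidable (Pre_strategia_d movie_list) := by unfold Pre_strategia_d; infer_instance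
def pvWitness_strategia_d : (List (List (String × Int))) :=
  [[("end", 5), ("start", 1)], [("end", 5), ("start", 3)], [("end", 2), ("start", 0)]]

def Spec_strategia_d (movie_list : List (List (String × Int))) (out : List (String × Int)) : Prop := out = strategia_d_alt movie_list
instance (movie_list : List (List (String × Int))) (out : List (String × Int)) : Decidable (Spec_strategia_d movie_list out) := by unfold Spec_strategia_d; infer_instance

-- ===== CLAIM (what is proved, stated in full; the proofs are below) =====
def Claim_equal_strategia_d : Prop := ∀ (movie_list : List (List (String × Int))), Dom_strategia_d movie_list → Pre_strategia_d movie_list → Spec_strategia_d movie_list (strategia_d movie_list)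

-- ===== LEMMAS AND PROOFS =====

-- the comparison sorted2 sorts by (and min-scans by)
def pvBefore (x m : List (String × Int)) : Bool :=
  decide (pvEnd x < pvEnd m) || (!decide (pvEnd m < pvEnd x) && decide (-(pvStart x) < -(pvStart m)))

-- A's loop body
def pvStepA (e m : List (String × Int)) : List (String × Int) :=
  if pvEnd e > pvEnd m then m
  else if pvEnd e = pvEnd m ∧ pvStart e < pvStart m then m
  else e

-- first-minimum step on an Option accumulator
def pvStepO (o : Option (List (String × Int))) (x : List (String × Int)) : Option (List (String × Int)) :=
  match o with
  | none => some x
  | some m => if pvBefore x m then some x else some m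

lemma pvHead_insertBy (x : List (String × Int)) (acc : List (List (String × Int))) :
    (PySem.List.insertBy pvBefore x acc).head? = pvStepO acc.head? x := by
  cases acc with
  | nil => simp [PySem.List.insertBy, pvStepO]
  | cons y ys =>
      simp only [PySem.List.insertBy, pvStepO, List.head?]
      by_cases h : pvBefore x y <;> simp [h]

lemma pvHead_foldl_insertBy (xs : List (List (String × Int))) (acc : List (List (String × Int))) :
    (xs.foldl (fun acc x => PySem.List.insertBy pvBefore x acc) acc).head? =
      xs.foldl pvStepO acc.head? := by
  induction xs generalizing acc with
  | nil => rfl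
  | cons x t ih => simp only [List.foldl_cons, ih, pvHead_insertBy]

lemma pvStepO_some (e m : List (String × Int)) :
    pvStepO (some e) m = some (pvStepA e m) := by
  simp only [pvStepO, pvStepA, pvBefore, Bool.or_eq_true, Bool.and_eq_true,
    Bool.not_eq_true', decide_eq_true_eq, decide_eq_false_iff_not, neg_lt_neg_iff, gt_iff_lt]
  split_ifs <;> first | rfl | (exfalso; omega)

lemma pvFoldO_some (t : List (List (String × Int))) (a : List (String × Int)) :
    t.foldl pvStepO (some a) = some (t.foldl pvStepA a) := by
  induction t generalizing a with
  | nil => rfl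
  | cons m t ih => simp only [List.foldl_cons, pvStepO_some, ih]

lemma pvStepA_self (a : List (String × Int)) : pvStepA a a = a := by
  unfold pvStepA; simp

lemma pvPyGet_zero {α : Type} (l : List α) : PySem.List.pyGet? l 0 = l.head? := by
  cases l <;> simp [PySem.List.pyGet?, PySem.List.pyIdx?, List.head?]

-- ===== VERDICT (by name: the statement is the Claim_ definition above) =====
theorem strategia_d_spec : Claim_equal_strategia_d := by
  intro xs _ hpre
  obtain ⟨hne, -⟩ := hpre
  cases xs with
  | nil => exact absurd rfl hne
  | cons h t =>
      show strategia_d (h :: t) = strategia_d_alt (h :: t)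
      have hB : strategia_d_alt (h :: t) = ((h :: t).foldl pvStepO none).getD [] := by
        unfold strategia_d_alt
        rw [pvPyGet_zero]
        have : PySem.List.sorted2 (h :: t) (fun m => pvEnd m) (fun m => -(pvStart m)) false
            = (h :: t).foldl (fun acc x => PySem.List.insertBy pvBefore x acc) [] := by
          simp only [PySem.List.sorted2]; rfl
        rw [this, pvHead_foldl_insertBy]
        rfl
      have hA : strategia_d (h :: t) = t.foldl pvStepA h := by
        unfold strategia_d
        rw [pvPyGet_zero]
        show (h :: t).foldl pvStepA h = t.foldl pvStepA h
        simp only [List.foldl_cons, pvStepA_self]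
      rw [hB]
      simp only [List.foldl_cons, pvStepO]
      rw [pvFoldO_some]
      exact hA
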